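-- pv_equiv track=rewrite | github.com/yifanwang123/Canonical_Labeling_tracy | CL3/two_dim_ref_3.py | update_dict_with_split_lists
-- ===== SOURCE A (Python) =====
-- def update_dict_with_split_lists(d, key_to_split, split_lists):
--     new_dict = {}
--     current_index = 0
--
--     for key in sorted(d.keys()):
--         if key == key_to_split:
--             for split_list in split_lists:
--                 new_dict[current_index] = split_list
--                 current_index += 1
--         else:
--             new_dict[current_index] = d[key]
--             current_index += 1
--
--     return new_dict
-- ===== SOURCE B (Python) =====
-- def update_dict_with_split_lists(d, key_to_split, split_lists):
--     keys = sorted(d)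
--     vals = [d[k] for k in keys]
--     if key_to_split in d:
--         i = keys.index(key_to_split)
--         vals[i:i+1] = list(split_lists)
--     return dict(enumerate(vals))
-- ===== Notes on version B (the rewrite author's own statement) =====
-- stated objective: alternative
-- what changed: B removes A's per-key branch and running current_index counter: it maps the sorted keys to their values in one plain pass, then splices split_lists in by a single slice assignment at the position of key_to_split (found once with list.index), and finally gets the integer keys from dict(enumerate(...)).
import Mathlib
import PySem

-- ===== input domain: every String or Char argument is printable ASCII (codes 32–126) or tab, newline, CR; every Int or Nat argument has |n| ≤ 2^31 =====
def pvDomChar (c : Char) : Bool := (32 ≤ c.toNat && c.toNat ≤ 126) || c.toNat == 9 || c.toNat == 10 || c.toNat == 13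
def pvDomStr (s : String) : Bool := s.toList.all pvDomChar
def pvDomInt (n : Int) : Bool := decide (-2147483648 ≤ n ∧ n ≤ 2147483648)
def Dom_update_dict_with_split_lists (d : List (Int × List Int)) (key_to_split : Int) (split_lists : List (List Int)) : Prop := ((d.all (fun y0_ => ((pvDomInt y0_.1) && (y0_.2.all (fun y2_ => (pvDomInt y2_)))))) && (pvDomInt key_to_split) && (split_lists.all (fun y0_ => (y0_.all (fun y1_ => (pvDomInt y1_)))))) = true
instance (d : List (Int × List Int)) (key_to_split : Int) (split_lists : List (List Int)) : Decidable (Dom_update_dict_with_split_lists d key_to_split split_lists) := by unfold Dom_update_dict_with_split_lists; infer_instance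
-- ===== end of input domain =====

-- B removes A's per-key branch and running counter: it maps the sorted keys to their
-- values, splices split_lists in by one slice assignment at key_to_split's index,
-- and takes the integer keys from dict(enumerate(...)); objective: alternative.

-- ===== PORT A =====
-- d[key] is ported as getD _ [] : every key iterated comes from dd.keys, so the
-- lookup always succeeds in Python and the default is never used (exact).
def update_dict_with_split_lists (d : List (Int × List Int)) (key_to_split : Int) (split_lists : List (List Int)) : List (Int × List Int) :=
  let dd := PySem.Dict.ofList d
  let st := (PySem.List.sorted dd.keys (fun x => x) false).foldl
    (fun (st : PySem.Dict Int (List Int) × Int) key =>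
      if key = key_to_split then
        split_lists.foldl (fun st split_list => (st.1.insert st.2 split_list, st.2 + 1)) st
      else
        (st.1.insert st.2 (dd.getD key []), st.2 + 1))
    (PySem.Dict.empty, 0)
  st.1.items

-- ===== PORT B =====
-- The slice assignment vals[i:i+1] = list(split_lists) with 0 ≤ i < len(vals) is
-- exactly take i ++ split_lists ++ drop (i+1) (exact, since keys.index succeeds).
def update_dict_with_split_lists_alt (d : List (Int × List Int)) (key_to_split : Int) (split_lists : List (List Int)) : List (Int × List Int) :=
  let dd := PySem.Dict.ofList d
  let keys := PySem.List.sorted dd.keys (fun x => x) false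
  let vals := keys.map (fun k => dd.getD k [])
  let vals2 :=
    if dd.contains key_to_split then
      match PySem.List.index? keys key_to_split with
      | some i => vals.take i ++ split_lists ++ vals.drop (i + 1)
      | none => vals
    else vals
  (PySem.Dict.ofList (PySem.List.enumerate vals2)).items

-- ===== PRECONDITION & SPEC =====
def Spec_update_dict_with_split_lists (d : List (Int × List Int)) (key_to_split : Int) (split_lists : List (List Int)) (out : List (Int × List Int)) : Prop := out = update_dict_with_split_lists_alt d key_to_split split_lists
instance (d : List (Int × List Int)) (key_to_split : Int) (split_lists : List (List Int)) (out : List (Int × List Int)) : Decidable (Spec_update_dict_with_split_lists d key_to_split split_lists out) := by unfold Spec_update_dict_with_split_lists; infer_instance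

-- ===== CLAIM (what is proved, stated in full; the proofs are below) =====
def Claim_equal_update_dict_with_split_lists : Prop := ∀ (d : List (Int × List Int)) (key_to_split : Int) (split_lists : List (List Int)), Dom_update_dict_with_split_lists d key_to_split split_lists → Spec_update_dict_with_split_lists d key_to_split split_lists (update_dict_with_split_lists d key_to_split split_lists)

-- ===== LEMMAS AND PROOFS =====

-- inserting at key = current length appends a fresh entry to an enumerate-shaped dict
theorem pv_insert_enum (vs : List (List Int)) (x : List Int) :
    (PySem.Dict.mk (PySem.List.enumerate vs 0)).insert (vs.length : Int) x
      = PySem.Dict.mk (PySem.List.enumerate (vs ++ [x]) 0) := by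
  apply PySem.Dict.ext
  rw [PySem.Dict.items_insert_of_not_contains]
  · simp [PySem.List.enumerate_append]
  · rw [PySem.Dict.contains_eq_decide_mem_keys]
    simp only [PySem.Dict.keys_mk, PySem.List.map_fst_enumerate]
    simp [PySem.List.mem_pyRange_one]

-- A's inner loop over split_lists, characterised on an enumerate-shaped state
theorem pv_inner (sls : List (List Int)) (vs : List (List Int)) :
    sls.foldl (fun (st : PySem.Dict Int (List Int) × Int) split_list =>
        (st.1.insert st.2 split_list, st.2 + 1))
      (PySem.Dict.mk (PySem.List.enumerate vs 0), (vs.length : Int))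
    = (PySem.Dict.mk (PySem.List.enumerate (vs ++ sls) 0), ((vs ++ sls).length : Int)) := by
  induction sls generalizing vs with
  | nil => simp
  | cons sl t ih =>
      simp only [List.foldl_cons, pv_insert_enum]
      have h1 : ((vs.length : Int) + 1) = (((vs ++ [sl]).length : Nat) : Int) := by
        simp
      rw [h1, ih (vs ++ [sl])]
      simp

-- A's outer loop over the sorted keys: its dict is the enumerate of the flatMap of values
theorem pv_outer (key_to_split : Int) (split_lists : List (List Int))
    (dd : PySem.Dict Int (List Int)) (ks : List Int) (vs : List (List Int)) :
    (ks.foldl (fun (st : PySem.Dict Int (List Int) × Int) key =>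
        if key = key_to_split then
          split_lists.foldl (fun st split_list => (st.1.insert st.2 split_list, st.2 + 1)) st
        else
          (st.1.insert st.2 (dd.getD key []), st.2 + 1))
      (PySem.Dict.mk (PySem.List.enumerate vs 0), (vs.length : Int))).1
    = PySem.Dict.mk (PySem.List.enumerate
        (vs ++ ks.flatMap (fun k => if k = key_to_split then split_lists else [dd.getD k []])) 0) := by
  induction ks generalizing vs with
  | nil => simp
  | cons k t ih =>
      by_cases hk : k = key_to_split
      · subst hk
        rw [List.foldl_cons, if_pos rfl, pv_inner, ih (vs ++ split_lists)]
        simp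
      · simp only [List.foldl_cons, if_neg hk, pv_insert_enum]
        have h1 : ((vs.length : Int) + 1) = (((vs ++ [dd.getD k []]).length : Nat) : Int) := by
          simp
        rw [h1, ih (vs ++ [dd.getD k []])]
        simp [hk]

-- dict(enumerate(values)) has exactly the enumerate pairs as items (keys are fresh and distinct)
theorem pv_ofList_enumerate (vs : List (List Int)) :
    (PySem.Dict.ofList (PySem.List.enumerate vs 0)).items = PySem.List.enumerate vs 0 := by
  show ((PySem.Dict.empty : PySem.Dict Int (List Int)).update (PySem.List.enumerate vs 0)).items = _
  rw [show (PySem.Dict.empty : PySem.Dict Int (List Int)).update (PySem.List.enumerate vs 0)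
        = (PySem.List.enumerate vs 0).foldl (fun d a => d.insert a.1 a.2) PySem.Dict.empty from rfl]
  rw [PySem.Dict.items_foldl_insert_fresh (PySem.List.enumerate vs 0) (fun a => a.1) (fun a => a.2)]
  · simp [PySem.Dict.empty]
  · intro a _; simp [PySem.Dict.contains_empty]
  · rw [show List.map (fun a => a.1) (PySem.List.enumerate vs 0)
          = List.map (fun (x : Int × List Int) => x.1) (PySem.List.enumerate vs 0) from rfl,
        PySem.List.map_fst_enumerate]
    exact PySem.List.nodup_pyRange_one 0 _

-- a flatMap whose branch never fires is a plain map
theorem pv_flatMap_no_match (sls : List (List Int)) (f : Int → List Int)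
    (v : Int) (l : List Int) (hv : v ∉ l) :
    l.flatMap (fun k => if k = v then sls else [f k]) = l.map f := by
  induction l with
  | nil => simp
  | cons x t ih =>
      have hx : x ≠ v := fun h => hv (h ▸ List.mem_cons_self)
      simp only [List.flatMap_cons, if_neg hx, List.map_cons,
        ih (fun h => hv (List.mem_cons_of_mem _ h))]
      rfl

-- the branching flatMap equals the splice of split_lists at the index of v
theorem pv_flatMap_splice (sls : List (List Int)) (f : Int → List Int)
    (v : Int) (l : List Int) (i : Nat)
    (hn : l.Nodup) (hi : PySem.List.index? l v = some i) :
    l.flatMap (fun k => if k = v then sls else [f k])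
      = (l.map f).take i ++ sls ++ (l.map f).drop (i + 1) := by
  obtain ⟨pre, suf, hl, hlen, hpre⟩ := (PySem.List.index?_eq_some_iff l v i).1 hi
  subst hl
  have hsuf : v ∉ suf := by
    have := hn.sublist (List.sublist_append_right pre (v :: suf))
    simp only [List.nodup_cons] at this
    exact this.1
  rw [List.flatMap_append, List.flatMap_cons, pv_flatMap_no_match sls f v pre hpre,
      pv_flatMap_no_match sls f v suf hsuf]
  have ht : ((pre ++ v :: suf).map f).take i = pre.map f := by
    rw [List.map_append, List.take_append_of_le_length (by simp [hlen])]
    simp [hlen]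
  have hd : ((pre ++ v :: suf).map f).drop (i + 1) = suf.map f := by
    subst hlen
    rw [List.map_append,
        show pre.length + 1 = (pre.map f).length + 1 from by simp,
        List.drop_append]
    simp
  rw [ht, hd]
  simp

-- ===== VERDICT (by name: the statement is the Claim_ definition above) =====
theorem update_dict_with_split_lists_spec : Claim_equal_update_dict_with_split_lists := by
  intro d key_to_split split_lists _
  show update_dict_with_split_lists d key_to_split split_lists
      = update_dict_with_split_lists_alt d key_to_split split_lists
  unfold update_dict_with_split_lists update_dict_with_split_lists_alt
  set dd := PySem.Dict.ofList d with hdd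
  set ks := PySem.List.sorted dd.keys (fun x => x) false with hks
  have hA := congrArg PySem.Dict.items
      (pv_outer key_to_split split_lists dd ks [])
  simp only [List.nil_append, List.length_nil, Nat.cast_zero] at hA
  rw [show PySem.Dict.mk (PySem.List.enumerate ([] : List (List Int)) 0) = PySem.Dict.empty from rfl] at hA
  rw [hA, ← pv_ofList_enumerate]
  have hnod : ks.Nodup := (PySem.List.sorted_perm dd.keys (fun x => x) false).nodup_iff.2
      (PySem.Dict.nodup_keys_ofList d)
  by_cases hc : dd.contains key_to_split = true
  · have hmem : key_to_split ∈ ks := by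
      rw [PySem.List.mem_sorted]
      exact (PySem.Dict.contains_iff_mem_keys dd key_to_split).1 hc
    obtain ⟨i, hi⟩ := Option.isSome_iff_exists.1
      ((PySem.List.index?_isSome_iff ks key_to_split).2 hmem)
    simp only [if_pos hc, ← hks, hi]
    exact congrArg (fun vs => (PySem.Dict.ofList (PySem.List.enumerate vs)).items)
      (pv_flatMap_splice split_lists (fun k => dd.getD k []) key_to_split ks i hnod hi)
  · have hmem : key_to_split ∉ ks := by
      rw [PySem.List.mem_sorted]
      exact fun h => hc ((PySem.Dict.contains_iff_mem_keys dd key_to_split).2 h)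
    simp only [if_neg hc, ← hks]
    exact congrArg (fun vs => (PySem.Dict.ofList (PySem.List.enumerate vs)).items)
      (pv_flatMap_no_match split_lists (fun k => dd.getD k []) key_to_split ks hmem)
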